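-- pv_equiv track=rewrite | github.com/ashotm1/ai-market-signal | scraper/gnw_scraper.py | _word_prefix_match
-- ===== SOURCE A (Python) =====
-- def _word_prefix_match(source: str, lookup: dict) -> str:
--     """Match source to a ticker_details name via word-level prefix, then first-2-word fallback."""
--     s_words = source.lower().strip().split()
--     if not s_words:
--         return ""
--     # pass 1: shorter is a full word-level prefix of longer
--     for name, ticker in lookup.items():
--         n_words = name.split()
--         shorter, longer = (s_words, n_words) if len(s_words) <= len(n_words) else (n_words, s_words)
--         if all(a == b for a, b in zip(shorter, longer)):
--             return ticker
--     # pass 2: first 2 words match (both must have at least 2 words)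
--     if len(s_words) >= 2:
--         for name, ticker in lookup.items():
--             n_words = name.split()
--             if len(n_words) >= 2 and s_words[:2] == n_words[:2]:
--                 return ticker
--     return ""
-- ===== SOURCE B (Python) =====
-- def _word_prefix_match(source: str, lookup: dict) -> str:
--     """Single pass: return on a word-level prefix hit, else remember the first
--     first-2-word fallback candidate and return it (or "") after the loop."""
--     s_words = source.lower().strip().split()
--     if not s_words:
--         return ""
--     fallback = None
--     for name, ticker in lookup.items():
--         n_words = name.split()
--         if all(a == b for a, b in zip(s_words, n_words)):
--             return ticker
--         if fallback is None and len(s_words) >= 2 and len(n_words) >= 2 and s_words[:2] == n_words[:2]: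
--             fallback = ticker
--     return fallback if fallback is not None else ""
-- ===== Notes on version B (the rewrite author's own statement) =====
-- stated objective: simpler
-- what changed: The two sequential scans (prefix pass, then first-2-word fallback pass) are fused into a single loop that returns on a prefix hit and records the first fallback candidate, and the shorter/longer swap is dropped since zip truncates and equality is symmetric.
import Mathlib
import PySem

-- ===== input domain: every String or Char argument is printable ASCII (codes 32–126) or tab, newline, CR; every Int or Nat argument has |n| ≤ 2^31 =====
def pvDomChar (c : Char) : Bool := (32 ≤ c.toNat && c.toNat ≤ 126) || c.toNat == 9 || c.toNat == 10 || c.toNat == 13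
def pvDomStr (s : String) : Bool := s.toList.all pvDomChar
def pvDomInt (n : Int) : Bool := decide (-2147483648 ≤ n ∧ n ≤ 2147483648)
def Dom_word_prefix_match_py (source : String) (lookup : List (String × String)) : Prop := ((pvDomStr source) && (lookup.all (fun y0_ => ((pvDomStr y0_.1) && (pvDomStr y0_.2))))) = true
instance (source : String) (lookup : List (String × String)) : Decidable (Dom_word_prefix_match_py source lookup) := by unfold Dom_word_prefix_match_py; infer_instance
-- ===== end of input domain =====

-- B fuses A's two scans into one loop with a first-fallback accumulator and drops the
-- shorter/longer swap (zip truncates, equality is symmetric); same result, simpler.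

-- ===== PORT A =====
-- pass-1 per-entry test: shorter is a full word-level prefix of longer
def pvCond1 (sw nw : List String) : Bool :=
  let p := if sw.length ≤ nw.length then (sw, nw) else (nw, sw)
  (p.1.zip p.2).all (fun ab => ab.1 == ab.2)

-- pass 1 loop over lookup.items()
def pvPass1 (sw : List String) : List (String × String) → Option String
  | [] => none
  | (name, ticker) :: rest =>
    if pvCond1 sw (PySem.Str.split₀ name) then some ticker else pvPass1 sw rest

-- pass 2 loop over lookup.items() (s_words[:2] / name.split()[:2] = List.take 2, exact for a nonnegative slice end)
def pvPass2 (sw : List String) : List (String × String) → Option String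
  | [] => none
  | (name, ticker) :: rest =>
    let nw := PySem.Str.split₀ name
    if 2 ≤ nw.length && sw.take 2 == nw.take 2 then some ticker else pvPass2 sw rest

def word_prefix_match_py (source : String) (lookup : List (String × String)) : String :=
  let sw := PySem.Str.split₀ (PySem.Str.strip (PySem.Str.lower source))
  if sw.isEmpty then ""
  else
    match pvPass1 sw lookup with
    | some t => t
    | none =>
      if 2 ≤ sw.length then
        match pvPass2 sw lookup with
        | some t => t
        | none => ""
      else ""

-- ===== PORT B =====
-- single loop: return on a prefix hit, else record the first fallback candidate
def pvLoopB (sw : List String) : List (String × String) → Option String → String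
  | [], fb => fb.getD ""
  | (name, ticker) :: rest, fb =>
    let nw := PySem.Str.split₀ name
    if (sw.zip nw).all (fun ab => ab.1 == ab.2) then ticker
    else
      pvLoopB sw rest
        (if fb.isNone && 2 ≤ sw.length && 2 ≤ nw.length && sw.take 2 == nw.take 2
         then some ticker else fb)

def word_prefix_match_py_alt (source : String) (lookup : List (String × String)) : String :=
  let sw := PySem.Str.split₀ (PySem.Str.strip (PySem.Str.lower source))
  if sw.isEmpty then "" else pvLoopB sw lookup none

-- ===== PRECONDITION & SPEC =====
def Spec_word_prefix_match_py (source : String) (lookup : List (String × String)) (out : String) : Prop := out = word_prefix_match_py_alt source lookup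
instance (source : String) (lookup : List (String × String)) (out : String) : Decidable (Spec_word_prefix_match_py source lookup out) := by unfold Spec_word_prefix_match_py; infer_instance

-- ===== CLAIM (what is proved, stated in full; the proofs are below) =====
def Claim_equal_word_prefix_match_py : Prop := ∀ (source : String) (lookup : List (String × String)), Dom_word_prefix_match_py source lookup → Spec_word_prefix_match_py source lookup (word_prefix_match_py source lookup)

-- ===== LEMMAS AND PROOFS =====
theorem pv_zip_all_eq_comm (xs ys : List String) :
    ((xs.zip ys).all (fun ab => ab.1 == ab.2)) = ((ys.zip xs).all (fun ab => ab.1 == ab.2)) := by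
  induction xs generalizing ys with
  | nil => cases ys <;> rfl
  | cons x xs ih =>
    cases ys with
    | nil => rfl
    | cons y ys => simp [List.zip_cons_cons, List.all_cons, ih, BEq.comm]

theorem pvCond1_eq_zip (sw nw : List String) :
    pvCond1 sw nw = ((sw.zip nw).all (fun ab => ab.1 == ab.2)) := by
  unfold pvCond1
  split
  · rfl
  · exact pv_zip_all_eq_comm nw sw

theorem pvLoopB_eq (sw : List String) (lookup : List (String × String)) (fb : Option String) :
    pvLoopB sw lookup fb =
      match pvPass1 sw lookup with
      | some t => t
      | none => fb.getD (if 2 ≤ sw.length then (pvPass2 sw lookup).getD "" else "") := by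
  induction lookup generalizing fb with
  | nil =>
    simp only [pvLoopB, pvPass1, pvPass2]
    cases fb <;> simp
  | cons e rest ih =>
    obtain ⟨name, ticker⟩ := e
    simp only [pvLoopB, pvPass1, pvPass2, pvCond1_eq_zip]
    by_cases h1 : ((sw.zip (PySem.Str.split₀ name)).all (fun ab => ab.1 == ab.2)) = true
    · simp [h1]
    · rw [if_neg h1, if_neg h1, ih]
      cases hp : pvPass1 sw rest with
      | some t => rfl
      | none =>
        cases fb with
        | some f => simp
        | none =>
          by_cases hs : 2 ≤ sw.length
          · by_cases h2a : 2 ≤ (PySem.Str.split₀ name).length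
            · by_cases h2b : (sw.take 2 == (PySem.Str.split₀ name).take 2) = true
              · simp [hs, h2a, h2b]
              · simp [hs, h2a, h2b]
            · simp [hs, h2a]
          · simp [hs]

-- ===== VERDICT (by name: the statement is the Claim_ definition above) =====
theorem word_prefix_match_py_spec : Claim_equal_word_prefix_match_py := by
  intro source lookup _
  unfold Spec_word_prefix_match_py word_prefix_match_py word_prefix_match_py_alt
  set sw := PySem.Str.split₀ (PySem.Str.strip (PySem.Str.lower source)) with hsw
  by_cases he : sw.isEmpty
  · simp [he]
  · simp only [he, if_neg, Bool.not_eq_true]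
    rw [pvLoopB_eq]
    cases hp : pvPass1 sw lookup with
    | some t => rfl
    | none =>
      simp only [Option.getD_none]
      by_cases hs : 2 ≤ sw.length
      · simp only [hs, if_pos]
        cases pvPass2 sw lookup <;> rfl
      · simp [hs]
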